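-- pv_equiv track=rewrite | github.com/KKSTB/isaac_lab_gundam_robot_urdf | gundam_rx78_description/scripts/rename_resize_joint_link.py | do_rename
-- ===== SOURCE A (Python) =====
-- class UrdfConst:
--     RESIZE_SCALE    = 0.1
--     USE_URDF_IMPORTER_SCALING = True    # Use "Stage Units Per Meter" to scale down the model, to avoid collision mesh bug
--     MIMIC_MARGIN    = 1.25              # Add some margins to mimic joint limits to hopefully solve crash bug during RL training
--     FIX_MIMIC_JOINTS= False             # Set mimic joints to fixed to hopefully solve crash bug during RL training
--
--     URDF_EXT        = '.urdf'
--     JOINT_TAG       = ('<joint name="', '" type="revolute">')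
--     CHILD_TAG       = ('<child link="', '"/>')
--     ORIGIN_TAG      = ('<origin xyz="', '" rpy="')
--     MASS_TAG        = ('<mass value="', '"/>')
--     INERTIA_TAG     = ('<inertia ixx="', '" ixy="', '" ixz="', '" iyy="', '" iyz="', '" izz="', '"/>')
--     EFFORT_TAG      = ('<limit effort="', '" lower="')
--     DYNAMICS_TAG    = ('<dynamics damping="', '" friction="', '"/>')
--     MESH_TAG        = ('<mesh filename="', '"/>')
--     MIMIC_TAG       = ('<mimic joint="', '" multiplier="', '" offset="', '"/>')
--     LIMIT_TAG       = ('<limit effort="', '" lower="', '" upper="', '" velocity="', '"/>')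
--     JOINT_END_TAG   = ('</joint>',)
--
-- def do_rename(urdf_lines: list[str]) -> list[str]:
--     joint_link_relationship = dict[str, str]()
--
--     for line_num, urdf_line in enumerate(urdf_lines):
--         # Search joint names
--         line_entry = urdf_line.strip()
--         if not line_entry.startswith(UrdfConst.JOINT_TAG[0]) or not line_entry.endswith(UrdfConst.JOINT_TAG[-1]):
--             continue
--         joint_name = line_entry[len(UrdfConst.JOINT_TAG[0]):-len(UrdfConst.JOINT_TAG[-1])]
--
--         # Search child link
--         for joint_line in urdf_lines[line_num + 1:]:
--             line_entry = joint_line.strip()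
--             if not line_entry.startswith(UrdfConst.CHILD_TAG[0]) or not line_entry.endswith(UrdfConst.CHILD_TAG[-1]):
--                 continue
--             link_name = line_entry[len(UrdfConst.CHILD_TAG[0]):-len(UrdfConst.CHILD_TAG[-1])]
--             # Build the relationship dict
--             joint_link_relationship[joint_name] = link_name
--             break
--
--     # Do the rename process
--     for line_num, urdf_line in enumerate(urdf_lines):
--         for joint_name, link_name in joint_link_relationship.items():
--             # Replace joint name so that it can be easier for searching
--             urdf_line = urdf_line.replace('"' + joint_name + '"', '"' + joint_name + '_joint"')
--             # Replace link name with meaningful name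
--             urdf_line = urdf_line.replace('"' + link_name + '"', '"' + joint_name + '_link"')
--         urdf_lines[line_num] = urdf_line
--
--     return urdf_lines
-- ===== SOURCE B (Python) =====
-- def do_rename(urdf_lines: list[str]) -> list[str]:
--     # Single forward pass: joints seen since the last child line are pending;
--     # the first child line after them supplies their link.
--     J0, J1 = '<joint name="', '" type="revolute">'
--     C0, C1 = '<child link="', '"/>'
--     mapping = {}
--     pending = []
--     for line in urdf_lines:
--         e = line.strip()
--         if e.startswith(J0) and e.endswith(J1):
--             pending.append(e[len(J0):-len(J1)])
--         elif e.startswith(C0) and e.endswith(C1):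
--             link = e[len(C0):-len(C1)]
--             for j in pending:
--                 mapping[j] = link
--             pending = []
--     subs = []
--     for j, l in mapping.items():
--         subs.append(('"' + j + '"', '"' + j + '_joint"'))
--         subs.append(('"' + l + '"', '"' + j + '_link"'))
--     out = []
--     for line in urdf_lines:
--         for old, new in subs:
--             line = line.replace(old, new)
--         out.append(line)
--     return out
-- ===== Notes on version B (the rewrite author's own statement) =====
-- stated objective: alternative
-- what changed: B builds the joint-to-link map in one forward pass (pending joints since the last child line are assigned when the child line arrives) instead of A's rescan of all remaining lines for every joint, and applies the renames by folding one pre-flattened list of (old,new) replacement pairs; B returns a fresh list instead of mutating the argument in place (return value identical).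
import Mathlib
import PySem

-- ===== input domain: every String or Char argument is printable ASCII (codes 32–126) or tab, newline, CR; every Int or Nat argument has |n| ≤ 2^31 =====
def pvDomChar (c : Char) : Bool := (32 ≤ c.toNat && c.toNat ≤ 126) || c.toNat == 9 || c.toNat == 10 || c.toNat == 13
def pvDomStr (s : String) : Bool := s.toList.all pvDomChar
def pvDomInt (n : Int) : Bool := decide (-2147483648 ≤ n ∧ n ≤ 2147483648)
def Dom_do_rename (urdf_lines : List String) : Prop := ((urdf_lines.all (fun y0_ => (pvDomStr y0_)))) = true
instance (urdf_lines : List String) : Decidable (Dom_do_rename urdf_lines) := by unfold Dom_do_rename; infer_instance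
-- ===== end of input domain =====

-- B builds the joint→link map in ONE forward pass (pending joints flushed at the next child line)
-- instead of A's per-joint rescan of the remaining lines, and folds one flattened replacement list;
-- equal RETURN value is what is proved (Python A also mutates its argument list in place, B does not).

-- ===== PORT A =====
def doRenameJ0 : String := "<joint name=\""
def doRenameJ1 : String := "\" type=\"revolute\">"
def doRenameC0 : String := "<child link=\""
def doRenameC1 : String := "\"/>"

-- inner loop "for joint_line in urdf_lines[line_num + 1:]" — ported as recursion on the tail
def doRenameFindChild : List String → Option String
  | [] => none
  | x :: xs =>
    let e := PySem.Str.strip x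
    if !(PySem.Str.startswith e doRenameC0) || !(PySem.Str.endswith e doRenameC1) then
      doRenameFindChild xs
    else
      some (PySem.Str.slice e (some 13) (some (-3)))

-- outer loop: enumerate is only used for urdf_lines[line_num + 1:], i.e. the tail of the recursion
def doRenameBuildA : List String → PySem.Dict String String → PySem.Dict String String
  | [], d => d
  | x :: xs, d =>
    let e := PySem.Str.strip x
    if !(PySem.Str.startswith e doRenameJ0) || !(PySem.Str.endswith e doRenameJ1) then
      doRenameBuildA xs d
    else
      let j := PySem.Str.slice e (some 13) (some (-18))
      match doRenameFindChild xs with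
      | some l => doRenameBuildA xs (d.insert j l)
      | none => doRenameBuildA xs d

-- rename loop body: for joint_name, link_name in joint_link_relationship.items(): two replaces
def doRenameLineA (d : PySem.Dict String String) (line : String) : String :=
  d.items.foldl (fun s p =>
    let s := PySem.Str.replace s ("\"" ++ p.1 ++ "\"") ("\"" ++ p.1 ++ "_joint\"")
    PySem.Str.replace s ("\"" ++ p.2 ++ "\"") ("\"" ++ p.1 ++ "_link\"")) line

def do_rename (urdf_lines : List String) : List String :=
  let d := doRenameBuildA urdf_lines PySem.Dict.empty
  urdf_lines.map (doRenameLineA d)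

-- ===== PORT B =====
-- one forward pass with the pending-joint list
def doRenameBuildB : List String → PySem.Dict String String → List String → PySem.Dict String String
  | [], d, _ => d
  | x :: xs, d, pending =>
    let e := PySem.Str.strip x
    if PySem.Str.startswith e doRenameJ0 && PySem.Str.endswith e doRenameJ1 then
      doRenameBuildB xs d (pending ++ [PySem.Str.slice e (some 13) (some (-18))])
    else if PySem.Str.startswith e doRenameC0 && PySem.Str.endswith e doRenameC1 then
      let l := PySem.Str.slice e (some 13) (some (-3))
      doRenameBuildB xs (pending.foldl (fun d j => d.insert j l) d) []
    else
      doRenameBuildB xs d pending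

-- subs: two (old, new) pairs per mapping item, flattened once
def doRenameSubs (d : PySem.Dict String String) : List (String × String) :=
  d.items.flatMap (fun p =>
    [("\"" ++ p.1 ++ "\"", "\"" ++ p.1 ++ "_joint\""),
     ("\"" ++ p.2 ++ "\"", "\"" ++ p.1 ++ "_link\"")])

def do_rename_alt (urdf_lines : List String) : List String :=
  let subs := doRenameSubs (doRenameBuildB urdf_lines PySem.Dict.empty [])
  urdf_lines.map (fun line => subs.foldl (fun s q => PySem.Str.replace s q.1 q.2) line)

-- ===== PRECONDITION & SPEC =====
def Spec_do_rename (urdf_lines : List String) (out : List String) : Prop := out = do_rename_alt urdf_lines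
instance (urdf_lines : List String) (out : List String) : Decidable (Spec_do_rename urdf_lines out) := by unfold Spec_do_rename; infer_instance

-- ===== CLAIM (what is proved, stated in full; the proofs are below) =====
def Claim_equal_do_rename : Prop := ∀ (urdf_lines : List String), Dom_do_rename urdf_lines → Spec_do_rename urdf_lines (do_rename urdf_lines)

-- ===== LEMMAS AND PROOFS =====

-- a stripped line cannot start with both the joint tag and the child tag
lemma doRename_joint_not_child (e : String) (h : PySem.Str.startswith e doRenameJ0 = true) :
    PySem.Str.startswith e doRenameC0 = false := by
  by_contra hc
  rw [Bool.not_eq_false] at hc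
  rw [PySem.Str.startswith_eq, PySem.Chars.startswith_iff] at h hc
  have h1 := List.prefix_iff_eq_take.mp h
  have h2 := List.prefix_iff_eq_take.mp hc
  have hlen : doRenameJ0.toList.length = doRenameC0.toList.length := by decide
  have hbad : doRenameJ0.toList = doRenameC0.toList := by rw [h1, h2, hlen]
  exact absurd hbad (by decide)

-- B's forward pass equals A's pass started after flushing the pending joints with xs's first child
set_option maxHeartbeats 1000000 in
lemma doRenameBuildB_eq (xs : List String) (d : PySem.Dict String String) (p : List String) :
    doRenameBuildB xs d p =
      doRenameBuildA xs
        (match doRenameFindChild xs with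
         | some l => p.foldl (fun d j => d.insert j l) d
         | none => d) := by
  induction xs generalizing d p with
  | nil => simp [doRenameBuildB, doRenameBuildA, doRenameFindChild]
  | cons x t ih =>
    by_cases hJ : (PySem.Str.startswith (PySem.Str.strip x) doRenameJ0 &&
                   PySem.Str.endswith (PySem.Str.strip x) doRenameJ1) = true
    · have h12 := hJ
      rw [Bool.and_eq_true] at h12
      obtain ⟨h1, h2⟩ := h12
      have hC0 : PySem.Str.startswith (PySem.Str.strip x) doRenameC0 = false :=
        doRename_joint_not_child _ h1
      have hFC : (!(PySem.Str.startswith (PySem.Str.strip x) doRenameC0) ||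
                  !(PySem.Str.endswith (PySem.Str.strip x) doRenameC1)) = true := by
        rw [hC0]; rfl
      have hA : ¬((!(PySem.Str.startswith (PySem.Str.strip x) doRenameJ0) ||
                   !(PySem.Str.endswith (PySem.Str.strip x) doRenameJ1)) = true) := by
        rw [h1, h2]; decide
      simp only [doRenameBuildB, doRenameBuildA, doRenameFindChild,
        if_pos hJ, if_pos hFC, if_neg hA]
      have hh := ih d (p ++ [PySem.Str.slice (PySem.Str.strip x) (some 13) (some (-18))])
      rw [hh]
      cases doRenameFindChild t with
      | none => simp
      | some l => simp [List.foldl_append]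
    · rw [Bool.not_eq_true] at hJ
      have hJn : ¬((PySem.Str.startswith (PySem.Str.strip x) doRenameJ0 &&
                    PySem.Str.endswith (PySem.Str.strip x) doRenameJ1) = true) := by
        rw [hJ]; decide
      have hA : (!(PySem.Str.startswith (PySem.Str.strip x) doRenameJ0) ||
                 !(PySem.Str.endswith (PySem.Str.strip x) doRenameJ1)) = true := by
        rw [← Bool.not_and, hJ]; rfl
      by_cases hC : (PySem.Str.startswith (PySem.Str.strip x) doRenameC0 &&
                     PySem.Str.endswith (PySem.Str.strip x) doRenameC1) = true
      · have h12 := hC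
        rw [Bool.and_eq_true] at h12
        obtain ⟨hc1, hc2⟩ := h12
        have hFC : ¬((!(PySem.Str.startswith (PySem.Str.strip x) doRenameC0) ||
                      !(PySem.Str.endswith (PySem.Str.strip x) doRenameC1)) = true) := by
          rw [hc1, hc2]; decide
        simp only [doRenameBuildB, doRenameBuildA, doRenameFindChild,
          if_neg hJn, if_pos hC, if_pos hA, if_neg hFC]
        have hh := ih (List.foldl (fun d j => d.insert j (PySem.Str.slice (PySem.Str.strip x) (some 13) (some (-3)))) d p) []
        rw [hh]
        cases doRenameFindChild t <;> simp
      · have hCn := hC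
        rw [Bool.not_eq_true] at hC
        have hFC : (!(PySem.Str.startswith (PySem.Str.strip x) doRenameC0) ||
                    !(PySem.Str.endswith (PySem.Str.strip x) doRenameC1)) = true := by
          rw [← Bool.not_and, hC]; rfl
        simp only [doRenameBuildB, doRenameBuildA, doRenameFindChild,
          if_neg hJn, if_neg hCn, if_pos hA, if_pos hFC]
        exact ih d p

-- fold over a flatMap is the nested fold
lemma doRename_foldl_flatMap {α β σ : Type} (l : List α) (f : α → List β)
    (step : σ → β → σ) (s : σ) :
    (l.flatMap f).foldl step s = l.foldl (fun s a => (f a).foldl step s) s := by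
  induction l generalizing s with
  | nil => rfl
  | cons a t ih => simp [List.foldl_append, ih]

lemma doRenameLine_eq (d : PySem.Dict String String) (line : String) :
    (doRenameSubs d).foldl (fun s q => PySem.Str.replace s q.1 q.2) line = doRenameLineA d line := by
  unfold doRenameSubs doRenameLineA
  rw [doRename_foldl_flatMap]
  rfl

lemma doRenameDict_eq (lines : List String) :
    doRenameBuildB lines PySem.Dict.empty [] = doRenameBuildA lines PySem.Dict.empty := by
  rw [doRenameBuildB_eq]
  cases doRenameFindChild lines <;> rfl

-- ===== VERDICT (by name: the statement is the Claim_ definition above) =====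
theorem do_rename_spec : Claim_equal_do_rename := by
  intro lines _
  unfold Spec_do_rename do_rename do_rename_alt
  rw [doRenameDict_eq]
  simp only [doRenameLine_eq]
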